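-- pv_equiv track=rewrite | github.com/reo91004/Algorithm | 3. Baekjoon/1268. 임시 반장 정하기.py | solution
-- ===== SOURCE A (Python) =====
-- def solution(N, student):
--     student_count = [0 for _ in range(N)]
--
--     for i in range(N):  # N번 학생에 대해 반복
--         # 두 학생이 1학년부터 5학년까지 중 한 번이라도 같은 반이었는지 확인
--         for j in range(i + 1, N):
--             if any(student[i][grade] == student[j][grade] for grade in range(5)):
--                 student_count[i] += 1
--                 student_count[j] += 1
--
--     return student_count.index(max(student_count)) + 1
-- ===== SOURCE B (Python) =====
-- def solution(N, student):
--     # Group students by (grade, class) once, then count each student's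
--     # distinct classmates as the union of its five groups (minus itself),
--     # tracking the first-occurring maximum on the fly.
--     groups = {}
--     for i in range(N):
--         for g, v in enumerate(student[i][:5]):
--             groups.setdefault((g, v), set()).add(i)
--     best_i, best_c = 0, -1
--     for i in range(N):
--         mates = set()
--         for g, v in enumerate(student[i][:5]):
--             mates |= groups[(g, v)]
--         c = len(mates) - 1
--         if c > best_c:
--             best_i, best_c = i, c
--     return best_i + 1
-- ===== Notes on version B (the rewrite author's own statement) =====
-- stated objective: alternative
-- what changed: Replaces A's all-pairs triangular comparison and mutable count array with a dict mapping (grade, class) to the set of students in that class, built in one pass; each student's count is the size of the union of its (up to five) groups minus itself, and the first-occurring maximum is tracked on the fly instead of index(max(...)).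
-- outside the precondition, e.g. on solution(1, []): A returns 1, B raises IndexError
import Mathlib
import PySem

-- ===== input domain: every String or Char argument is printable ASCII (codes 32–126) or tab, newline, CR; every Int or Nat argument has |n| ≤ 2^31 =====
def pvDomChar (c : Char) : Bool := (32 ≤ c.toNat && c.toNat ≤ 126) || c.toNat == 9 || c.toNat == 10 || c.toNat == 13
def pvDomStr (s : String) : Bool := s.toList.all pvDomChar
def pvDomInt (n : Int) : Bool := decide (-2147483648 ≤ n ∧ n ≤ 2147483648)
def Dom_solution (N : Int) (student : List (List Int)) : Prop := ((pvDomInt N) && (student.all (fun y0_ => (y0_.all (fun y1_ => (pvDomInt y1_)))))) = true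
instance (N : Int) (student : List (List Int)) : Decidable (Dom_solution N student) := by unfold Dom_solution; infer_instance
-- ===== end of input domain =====

-- B replaces A's all-pairs triangular comparison by a (grade, class) → set-of-students
-- hash index: each student's distinct classmates are the union of its five groups.

-- ===== PORT A =====
-- student_count = [0 for _ in range(N)]; triangular pair loop; index(max(...)) + 1.
-- Where a grade index is out of range Python raises IndexError (never on the inputs
-- where A returns normally); this total port scores such a comparison as 'no match'.
def solution (N : Int) (student : List (List Int)) : Int :=
  let counts0 : List Int := (PySem.List.pyRange 0 N 1).map (fun _ => (0 : Int))
  let counts :=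
    (PySem.List.pyRange 0 N 1).foldl (fun c i =>
      (PySem.List.pyRange (i + 1) N 1).foldl (fun c j =>
        if (PySem.List.pyRange 0 5 1).any (fun grade =>
            match PySem.List.pyGet? (PySem.List.pyGetD student i []) grade,
                  PySem.List.pyGet? (PySem.List.pyGetD student j []) grade with
            | some a, some b => a == b
            | _, _ => false) then
          (c.modify i.toNat (· + 1)).modify j.toNat (· + 1)
        else c) c) counts0
  match PySem.List.max? counts (fun y => y) with
  | some m => (((PySem.List.index? counts m).getD 0 : Nat) : Int) + 1
  | none => 0

-- ===== PORT B =====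
def solution_alt (N : Int) (student : List (List Int)) : Int :=
  let groups : PySem.Dict (Int × Int) (PySem.Set Int) :=
    (PySem.List.pyRange 0 N 1).foldl (fun d i =>
      (PySem.List.enumerate (PySem.List.slice (PySem.List.pyGetD student i []) none (some 5)) 0).foldl
        (fun d gv => d.modify (gv.1, gv.2) [] (fun s => PySem.Set.add s i)) d) PySem.Dict.empty
  let best :=
    (PySem.List.pyRange 0 N 1).foldl (fun (st : Int × Int) i =>
      let mates : PySem.Set Int :=
        (PySem.List.enumerate (PySem.List.slice (PySem.List.pyGetD student i []) none (some 5)) 0).foldl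
          (fun m gv => PySem.Set.union m (groups.getD (gv.1, gv.2) [])) PySem.Set.empty
      let c := PySem.Set.len mates - 1
      if c > st.2 then (i, c) else st) (0, -1)
  best.1 + 1

-- ===== PRECONDITION & SPEC =====
-- Pre_ excludes N < 1 (max([]) raises ValueError) and N > len(student) (IndexError), and,
-- for N >= 2, empty rows among the first N (their pair comparisons always raise in A);
-- rows shorter than the 5 grades stay inside only where A returns via any()'s short-circuit
-- or raises (nothing is claimed about Python A where it raises). For N = 1 A compares no
-- pairs and returns 1 whatever the rows hold (see cites for excluded returning inputs).
def Pre_solution (N : Int) (student : List (List Int)) : Prop :=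
  1 ≤ N ∧ N ≤ PySem.List.len student ∧ (N = 1 ∨ ∀ r ∈ student.take N.toNat, 1 ≤ r.length)
instance (N : Int) (student : List (List Int)) : Decidable (Pre_solution N student) := by
  unfold Pre_solution; infer_instance
def pvWitness_solution : Int × List (List Int) := (1, [[0, 0, 0, 0, 0]])
def Spec_solution (N : Int) (student : List (List Int)) (out : Int) : Prop := out = solution_alt N student
instance (N : Int) (student : List (List Int)) (out : Int) : Decidable (Spec_solution N student out) := by unfold Spec_solution; infer_instance

-- ===== CLAIM (what is proved, stated in full; the proofs are below) =====
def Claim_equal_solution : Prop := ∀ (N : Int) (student : List (List Int)), Dom_solution N student → Pre_solution N student → Spec_solution N student (solution N student)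

-- ===== LEMMAS AND PROOFS =====

def pvVal (student : List (List Int)) (i g : Int) : Int :=
  PySem.List.pyGetD (PySem.List.pyGetD student i []) g 0

-- students i and j provably shared a class: some grade g < 5 present in both rows with equal value
def pvShare (student : List (List Int)) (i j : Int) : Bool :=
  (PySem.List.pyRange 0 5 1).any (fun g =>
    match PySem.List.pyGet? (PySem.List.pyGetD student i []) g,
          PySem.List.pyGet? (PySem.List.pyGetD student j []) g with
    | some a, some b => a == b
    | _, _ => false)

def pvCnt (student : List (List Int)) (N i : Int) : Int :=
  (((PySem.List.pyRange 0 N 1).countP (fun j => pvShare student i j) : Nat) : Int) - 1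

lemma pvShare_symm (student : List (List Int)) (i j : Int) :
    pvShare student i j = pvShare student j i := by
  simp only [pvShare]
  apply PySem.List.any_congr_mem
  intro g _
  cases PySem.List.pyGet? (PySem.List.pyGetD student i []) g with
  | none =>
    cases PySem.List.pyGet? (PySem.List.pyGetD student j []) g <;> rfl
  | some a =>
    cases PySem.List.pyGet? (PySem.List.pyGetD student j []) g with
    | none => rfl
    | some b =>
      show (a == b) = (b == a)
      by_cases hab : a = b
      · simp [hab]
      · simp [hab, Ne.symm hab]

lemma pvShare_refl (student : List (List Int)) (i : Int)
    (h : 1 ≤ (PySem.List.pyGetD student i []).length) :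
    pvShare student i i = true := by
  simp only [pvShare, List.any_eq_true]
  refine ⟨0, by decide, ?_⟩
  have h0 : PySem.List.pyGet? (PySem.List.pyGetD student i []) 0
      = some ((PySem.List.pyGetD student i [])[0]'(by omega)) := by
    rw [PySem.List.pyGet?_zero]
    exact List.getElem?_eq_getElem (by omega)
  rw [h0]
  simp

-- g < 5 present in both rows with equal value, spelled out
lemma pvShare_iff (student : List (List Int)) (i j : Int) :
    pvShare student i j = true ↔ ∃ g : Int, 0 ≤ g ∧ g < 5
      ∧ g < ((PySem.List.pyGetD student i []).length : Int)
      ∧ g < ((PySem.List.pyGetD student j []).length : Int)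
      ∧ pvVal student i g = pvVal student j g := by
  simp only [pvShare, List.any_eq_true]
  constructor
  · rintro ⟨g, hg, hm⟩
    have hb := PySem.List.mem_pyRange_one.mp hg
    cases hi : PySem.List.pyGet? (PySem.List.pyGetD student i []) g with
    | none => rw [hi] at hm; cases hj : PySem.List.pyGet? (PySem.List.pyGetD student j []) g <;>
        rw [hj] at hm <;> simp at hm
    | some a =>
      cases hj : PySem.List.pyGet? (PySem.List.pyGetD student j []) g with
      | none => rw [hi, hj] at hm; simp at hm
      | some b =>
        rw [hi, hj] at hm
        have hab : a = b := by simpa using hm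
        have hiL : g < ((PySem.List.pyGetD student i []).length : Int) := by
          by_contra hc
          rw [PySem.List.pyGet?_of_nonneg _ hb.1, List.getElem?_eq_none (by omega)] at hi
          simp at hi
        have hjL : g < ((PySem.List.pyGetD student j []).length : Int) := by
          by_contra hc
          rw [PySem.List.pyGet?_of_nonneg _ hb.1, List.getElem?_eq_none (by omega)] at hj
          simp at hj
        refine ⟨g, hb.1, hb.2, hiL, hjL, ?_⟩
        rw [PySem.List.pyGet?_of_nonneg _ hb.1, List.getElem?_eq_getElem (by omega)] at hi
        rw [PySem.List.pyGet?_of_nonneg _ hb.1, List.getElem?_eq_getElem (by omega)] at hj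
        rw [pvVal, pvVal, PySem.List.pyGetD_eq_getElem _ _ hb.1 hiL,
          PySem.List.pyGetD_eq_getElem _ _ hb.1 hjL]
        rw [Option.some_inj.mp hi, Option.some_inj.mp hj, hab]
  · rintro ⟨g, h0, h5, hiL, hjL, heq⟩
    refine ⟨g, PySem.List.mem_pyRange_one.mpr ⟨h0, h5⟩, ?_⟩
    rw [PySem.List.pyGet?_of_nonneg _ h0, PySem.List.pyGet?_of_nonneg _ h0,
      List.getElem?_eq_getElem (by omega), List.getElem?_eq_getElem (by omega)]
    have := heq
    rw [pvVal, pvVal, PySem.List.pyGetD_eq_getElem _ _ h0 hiL,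
      PySem.List.pyGetD_eq_getElem _ _ h0 hjL] at this
    simpa using this

-- one student's dict updates over grades [0, M), seen through getD
lemma pv_build_stepM (student : List (List Int)) (i : Int) :
    ∀ (M : Nat) (g v : Int) (d : PySem.Dict (Int × Int) (PySem.Set Int)),
    (((PySem.List.pyRange 0 (M : Int) 1).foldl (fun d g =>
        d.modify (g, pvVal student i g) [] (fun s => PySem.Set.add s i)) d).getD (g, v) [])
      = if (0 ≤ g ∧ g < (M : Int)) ∧ v = pvVal student i g
        then PySem.Set.add (d.getD (g, v) []) i else d.getD (g, v) [] := by
  intro M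
  induction M with
  | zero =>
    intro g v d
    have h0 : PySem.List.pyRange 0 ((0 : Nat) : Int) 1 = [] := by
      push_cast; exact PySem.List.pyRange_one_eq_nil le_rfl
    rw [h0, List.foldl_nil, if_neg]
    rintro ⟨⟨h1, h2⟩, -⟩
    push_cast at h2
    omega
  | succ K ih =>
    intro g v d
    have hcast : ((K + 1 : Nat) : Int) = (K : Int) + 1 := by push_cast; ring
    rw [hcast, PySem.List.pyRange_one_succ_right (by omega), List.foldl_append,
      List.foldl_cons, List.foldl_nil, PySem.Dict.getD_modify,
      ih (K : Int) (pvVal student i (K : Int)) d, ih g v d]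
    by_cases hgK : ((g, v) : Int × Int) = ((K : Int), pvVal student i (K : Int))
    · rw [if_pos hgK, if_neg (by rintro ⟨⟨-, h⟩, -⟩; omega)]
      rw [Prod.ext_iff] at hgK
      obtain ⟨hg, hv⟩ := hgK
      simp only at hg hv
      subst hg
      rw [if_pos ⟨⟨by omega, by omega⟩, hv⟩, hv]
    · rw [if_neg hgK]
      by_cases hcond : (0 ≤ g ∧ g < (K : Int)) ∧ v = pvVal student i g
      · rw [if_pos hcond, if_pos ⟨⟨hcond.1.1, by omega⟩, hcond.2⟩]
      · rw [if_neg hcond, if_neg]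
        rintro ⟨⟨hg0, hgK1⟩, hv⟩
        by_cases hgEq : g = (K : Int)
        · subst hgEq
          exact hgK (by rw [hv])
        · exact hcond ⟨⟨hg0, by omega⟩, hv⟩

-- the fully built dict: group (g, v) holds the students j whose row has class v at grade g
lemma pv_build_getDW (student : List (List Int)) (N g v : Int) :
    (((PySem.List.pyRange 0 N 1).foldl (fun d i =>
        (PySem.List.pyRange 0 (PySem.List.len ((PySem.List.pyGetD student i []).take 5)) 1).foldl
          (fun d g => d.modify (g, pvVal student i g) [] (fun s => PySem.Set.add s i)) d)
        PySem.Dict.empty).getD (g, v) [])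
      = (PySem.List.pyRange 0 N 1).filter
          (fun j => (decide (0 ≤ g)
              && decide (g < PySem.List.len ((PySem.List.pyGetD student j []).take 5)))
            && (v == pvVal student j g)) := by
  rcases (by omega : N ≤ 0 ∨ 0 < N) with hN | hN
  · rw [PySem.List.pyRange_one_eq_nil hN]
    simp [PySem.Dict.getD_empty]
  · obtain ⟨n, rfl⟩ : ∃ n : Nat, N = (n : Int) := ⟨N.toNat, (Int.toNat_of_nonneg (by omega)).symm⟩
    clear hN
    induction n with
    | zero =>
      have h0 : PySem.List.pyRange 0 ((0 : Nat) : Int) 1 = [] := by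
        push_cast; exact PySem.List.pyRange_one_eq_nil le_rfl
      rw [h0]
      simp [PySem.Dict.getD_empty]
    | succ k ih =>
      have hcast : ((k + 1 : Nat) : Int) = (k : Int) + 1 := by push_cast; ring
      rw [hcast, PySem.List.pyRange_one_succ_right (by omega), List.foldl_append,
        List.filter_append, List.foldl_cons, List.foldl_nil]
      rw [show PySem.List.len ((PySem.List.pyGetD student (k : Int) []).take 5)
          = ((((PySem.List.pyGetD student (k : Int) []).take 5).length : Nat) : Int) by
        simp [PySem.List.len_eq]]
      rw [pv_build_stepM student (k : Int) _ g v, ih]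
      by_cases hc : (0 ≤ g ∧ g < ((((PySem.List.pyGetD student (k : Int) []).take 5).length : Nat) : Int))
          ∧ v = pvVal student (k : Int) g
      · rw [if_pos hc]
        have hnm : (k : Int) ∉ (PySem.List.pyRange 0 (k : Int) 1).filter
            (fun j => (decide (0 ≤ g)
                && decide (g < PySem.List.len ((PySem.List.pyGetD student j []).take 5)))
              && (v == pvVal student j g)) := by
          intro hmem
          have := PySem.List.mem_pyRange_one.mp (List.mem_of_mem_filter hmem)
          omega
        rw [PySem.Set.add_of_not_mem hnm]
        have hf : List.filter (fun j => (decide (0 ≤ g)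
              && decide (g < PySem.List.len ((PySem.List.pyGetD student j []).take 5)))
            && (v == pvVal student j g)) [(k : Int)] = [(k : Int)] := by
          rw [List.filter_cons, List.filter_nil, if_pos]
          refine Bool.and_eq_true_iff.mpr ⟨Bool.and_eq_true_iff.mpr ⟨?_, ?_⟩, ?_⟩
          · exact decide_eq_true hc.1.1
          · refine decide_eq_true ?_
            rw [PySem.List.len_eq]
            exact_mod_cast hc.1.2
          · exact beq_iff_eq.mpr hc.2
        rw [hf]
      · rw [if_neg hc]
        have hf : List.filter (fun j => (decide (0 ≤ g)
              && decide (g < PySem.List.len ((PySem.List.pyGetD student j []).take 5)))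
            && (v == pvVal student j g)) [(k : Int)] = [] := by
          rw [List.filter_cons, List.filter_nil, if_neg]
          intro h
          obtain ⟨⟨h1, h2⟩, hv⟩ := Bool.and_eq_true_iff.mp h |>.imp
            (fun x => Bool.and_eq_true_iff.mp x) id
          refine hc ⟨⟨of_decide_eq_true h1, ?_⟩, beq_iff_eq.mp hv⟩
          have h2' := of_decide_eq_true h2
          rw [PySem.List.len_eq] at h2'
          exact_mod_cast h2'
        rw [hf, List.append_nil]

lemma pv_mem_foldl_union (F : Int → List Int) (y : Int) :
    ∀ (l : List Int) (s : PySem.Set Int),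
      (y ∈ l.foldl (fun m g => PySem.Set.union m (F g)) s) ↔ y ∈ s ∨ ∃ g ∈ l, y ∈ F g := by
  intro l
  induction l with
  | nil => simp
  | cons a t ih =>
    intro s
    rw [List.foldl_cons, ih, PySem.Set.mem_union]
    constructor
    · rintro ((h | h) | ⟨g, hg, hy⟩)
      · exact Or.inl h
      · exact Or.inr ⟨a, List.mem_cons_self, h⟩
      · exact Or.inr ⟨g, List.mem_cons_of_mem _ hg, hy⟩
    · rintro (h | ⟨g, hg, hy⟩)
      · exact Or.inl (Or.inl h)
      · rcases List.mem_cons.mp hg with rfl | hg'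
        · exact Or.inl (Or.inr hy)
        · exact Or.inr ⟨g, hg', hy⟩

lemma pv_nodup_foldl_union (F : Int → List Int) :
    ∀ (l : List Int) (s : PySem.Set Int), s.Nodup →
      (l.foldl (fun m g => PySem.Set.union m (F g)) s).Nodup := by
  intro l
  induction l with
  | nil => intro s hs; simpa using hs
  | cons a t ih =>
    intro s hs
    rw [List.foldl_cons]
    exact ih _ (PySem.Set.nodup_union _ _ hs)

lemma pv_mates_lenW (student : List (List Int)) (N i : Int) :
    PySem.Set.len ((PySem.List.pyRange 0
        (PySem.List.len ((PySem.List.pyGetD student i []).take 5)) 1).foldl (fun m g =>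
        PySem.Set.union m
          ((PySem.List.pyRange 0 N 1).filter
            (fun j => (decide (0 ≤ g)
                && decide (g < PySem.List.len ((PySem.List.pyGetD student j []).take 5)))
              && (pvVal student i g == pvVal student j g))))
        PySem.Set.empty) - 1
      = pvCnt student N i := by
  set F : Int → List Int := fun g => (PySem.List.pyRange 0 N 1).filter
      (fun j => (decide (0 ≤ g)
          && decide (g < PySem.List.len ((PySem.List.pyGetD student j []).take 5)))
        && (pvVal student i g == pvVal student j g)) with hF
  set mates := (PySem.List.pyRange 0
      (PySem.List.len ((PySem.List.pyGetD student i []).take 5)) 1).foldl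
      (fun m g => PySem.Set.union m (F g)) PySem.Set.empty with hM
  have hnodupM : mates.Nodup := pv_nodup_foldl_union F _ _ List.nodup_nil
  have hnodupF : ((PySem.List.pyRange 0 N 1).filter (fun j => pvShare student i j)).Nodup :=
    (PySem.List.nodup_pyRange_one 0 N).filter _
  have hmem : ∀ j, j ∈ mates ↔ j ∈ (PySem.List.pyRange 0 N 1).filter (fun j => pvShare student i j) := by
    intro j
    rw [hM, pv_mem_foldl_union, List.mem_filter]
    constructor
    · rintro (h | ⟨g, hg, hj⟩)
      · simp [PySem.Set.empty] at h
      · have hgb := PySem.List.mem_pyRange_one.mp hg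
        rw [hF] at hj
        have hj' := List.mem_filter.mp hj
        obtain ⟨⟨h1, h2⟩, hv⟩ := Bool.and_eq_true_iff.mp hj'.2 |>.imp
          (fun x => Bool.and_eq_true_iff.mp x) id
        have h2' := of_decide_eq_true h2
        rw [PySem.List.len_eq] at h2'
        have hgi := hgb.2
        rw [PySem.List.len_eq] at hgi
        refine ⟨hj'.1, (pvShare_iff student i j).mpr ⟨g, hgb.1, ?_, ?_, ?_, beq_iff_eq.mp hv⟩⟩
        · have := List.length_take (i := 5) (l := PySem.List.pyGetD student i [])
          omega
        · have := List.length_take (i := 5) (l := PySem.List.pyGetD student i [])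
          omega
        · have := List.length_take (i := 5) (l := PySem.List.pyGetD student j [])
          omega
    · rintro ⟨hjr, hsh⟩
      obtain ⟨g, h0, h5, hiL, hjL, heq⟩ := (pvShare_iff student i j).mp hsh
      refine Or.inr ⟨g, PySem.List.mem_pyRange_one.mpr ⟨h0, ?_⟩, ?_⟩
      · rw [PySem.List.len_eq]
        have := List.length_take (i := 5) (l := PySem.List.pyGetD student i [])
        omega
      · rw [hF]
        refine List.mem_filter.mpr ⟨hjr, ?_⟩
        refine Bool.and_eq_true_iff.mpr ⟨Bool.and_eq_true_iff.mpr ⟨decide_eq_true h0, ?_⟩,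
          beq_iff_eq.mpr heq⟩
        refine decide_eq_true ?_
        rw [PySem.List.len_eq]
        have := List.length_take (i := 5) (l := PySem.List.pyGetD student j [])
        omega
  have hperm := (List.perm_ext_iff_of_nodup hnodupM hnodupF).mpr hmem
  have hlen : mates.length = ((PySem.List.pyRange 0 N 1).filter (fun j => pvShare student i j)).length :=
    hperm.length_eq
  simp only [PySem.Set.len, hlen, pvCnt, List.countP_eq_length_filter]

lemma pv_foldl_inc2 (share2 : Int → Int → Bool) :
    ∀ (P : List (Int × Int)) (c : List Int),
      (∀ q ∈ P, 0 ≤ q.1 ∧ q.1 < q.2 ∧ q.2 < (c.length : Int)) →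
      (P.foldl (fun c q => if share2 q.1 q.2
          then (c.modify q.1.toNat (· + 1)).modify q.2.toNat (· + 1) else c) c).length = c.length
      ∧ ∀ p : Nat, p < c.length →
        (P.foldl (fun c q => if share2 q.1 q.2
            then (c.modify q.1.toNat (· + 1)).modify q.2.toNat (· + 1) else c) c).getD p 0
          = c.getD p 0
            + ((P.countP (fun q => share2 q.1 q.2 && (q.1 == (p : Int) || q.2 == (p : Int))) : Nat) : Int) := by
  intro P
  induction P with
  | nil => intro c _; simp
  | cons q t ih =>
    intro c hb
    have hq := hb q List.mem_cons_self
    set c' : List Int := if share2 q.1 q.2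
        then (c.modify q.1.toNat (· + 1)).modify q.2.toNat (· + 1) else c with hc'
    have hlen' : c'.length = c.length := by
      rw [hc']; split <;> simp
    have hb' : ∀ r ∈ t, 0 ≤ r.1 ∧ r.1 < r.2 ∧ r.2 < (c'.length : Int) := by
      intro r hr; rw [hlen']; exact hb r (List.mem_cons_of_mem _ hr)
    obtain ⟨ihlen, ihget⟩ := ih c' hb'
    constructor
    · simpa [hlen'] using ihlen
    · intro p hp
      have hp' : p < c'.length := by omega
      have hstep : c'.getD p 0 = c.getD p 0
          + (if (share2 q.1 q.2 && (q.1 == (p : Int) || q.2 == (p : Int))) then (1:Int) else 0) := by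
        rw [hc']
        by_cases hs : share2 q.1 q.2
        · simp only [hs, if_true, Bool.true_and]
          have h1 : q.1.toNat < c.length := by omega
          have h2 : q.2.toNat < c.length := by omega
          have hgd : ∀ (l : List Int) (hl : p < l.length), l.getD p 0 = l[p]'hl := by
            intro l hl; rw [List.getD_eq_getElem l 0 hl]
          rw [hgd _ (by simp [List.length_modify]; omega), hgd _ hp]
          rw [List.getElem_modify]
          · rw [List.getElem_modify]
            by_cases e2 : q.2.toNat = p
            · have : (q.2 == (p:Int)) = true := by simp; omega
              simp [e2, this]
              have : ¬ q.1.toNat = p := by omega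
              simp [this]
            · have hne2 : (q.2 == (p:Int)) = false := by simp; omega
              by_cases e1 : q.1.toNat = p
              · have : (q.1 == (p:Int)) = true := by simp; omega
                simp [e2, e1, this, hne2]
              · have : (q.1 == (p:Int)) = false := by simp; omega
                simp [e2, e1, this, hne2]
        · have hs' : share2 q.1 q.2 = false := by simpa using hs
          simp [hs']
      rw [List.foldl_cons, ihget p hp', hstep, List.countP_cons]
      by_cases hcond : (share2 q.1 q.2 && (q.1 == (p : Int) || q.2 == (p : Int))) = true
      · simp [hcond]; push_cast; ring
      · have : (share2 q.1 q.2 && (q.1 == (p : Int) || q.2 == (p : Int))) = false := by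
          simpa using hcond
        simp [this]


lemma pv_countP_single (b : Int → Bool) (x : Int) :
    ∀ lst : List Int, lst.Nodup →
      lst.countP (fun j => b j && (j == x)) = if x ∈ lst ∧ b x then 1 else 0 := by
  intro lst
  induction lst with
  | nil => simp
  | cons a l ih =>
    intro hnd
    obtain ⟨hal, hl⟩ := List.nodup_cons.mp hnd
    rw [List.countP_cons, ih hl]
    by_cases hax : a = x
    · subst hax
      by_cases hba : b a
      · simp [hba, hal]
      · have : b a = false := by simpa using hba
        simp [this, hal]
    · have hax' : (a == x) = false := by simp [hax]
      have hmem : (x ∈ a :: l ∧ b x = true) ↔ (x ∈ l ∧ b x = true) := by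
        constructor
        · rintro ⟨hm, hbx⟩
          rcases List.mem_cons.mp hm with h | hm'
          · exact absurd h.symm hax
          · exact ⟨hm', hbx⟩
        · rintro ⟨hm, hbx⟩
          exact ⟨List.mem_cons_of_mem _ hm, hbx⟩
      have hiff : ((x = a ∨ x ∈ l) ∧ b x = true) ↔ (x ∈ l ∧ b x = true) := by
        constructor
        · rintro ⟨h | h, hb⟩
          · exact absurd h.symm hax
          · exact ⟨h, hb⟩
        · rintro ⟨h, hb⟩
          exact ⟨Or.inr h, hb⟩
      simp only [hax', Bool.and_false, List.mem_cons]
      simp only [hiff]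
      simp


lemma pv_pair_count (student : List (List Int)) (N p : Int) (h0 : 0 ≤ p) (hp : p < N)
    (hrow : 1 ≤ (PySem.List.pyGetD student p []).length) :
    ((PySem.List.pyRange 0 N 1).flatMap
        (fun i => (PySem.List.pyRange (i + 1) N 1).map (fun j => (i, j)))).countP
      (fun q => pvShare student q.1 q.2 && (q.1 == p || q.2 == p)) + 1
    = (PySem.List.pyRange 0 N 1).countP (fun j => pvShare student p j) := by
  rw [List.countP_flatMap]
  have hsplit : PySem.List.pyRange 0 N 1
      = PySem.List.pyRange 0 p 1 ++ p :: PySem.List.pyRange (p + 1) N 1 := by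
    rw [PySem.List.pyRange_one_append 0 p N h0 (by omega),
      PySem.List.pyRange_one_cons hp]
  have tdef : ∀ i : Int,
      (List.countP (fun q => pvShare student q.1 q.2 && (q.1 == p || q.2 == p)) ∘
        (fun i => (PySem.List.pyRange (i + 1) N 1).map (fun j => (i, j)))) i
      = (PySem.List.pyRange (i + 1) N 1).countP
          (fun j => pvShare student i j && (i == p || j == p)) := by
    intro i
    simp only [Function.comp_apply]
    rw [List.countP_map]
    rfl
  -- sums over the three pieces
  rw [hsplit, List.map_append, List.sum_append, List.map_cons, List.sum_cons]
  -- middle piece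
  have hmid : (List.countP (fun q => pvShare student q.1 q.2 && (q.1 == p || q.2 == p)) ∘
        (fun i => (PySem.List.pyRange (i + 1) N 1).map (fun j => (i, j)))) p
      = (PySem.List.pyRange (p + 1) N 1).countP (fun j => pvShare student p j) := by
    rw [tdef]
    apply List.countP_congr
    intro j _
    simp
  -- left piece
  have hleft : ((PySem.List.pyRange 0 p 1).map
        (List.countP (fun q => pvShare student q.1 q.2 && (q.1 == p || q.2 == p)) ∘
          (fun i => (PySem.List.pyRange (i + 1) N 1).map (fun j => (i, j))))).sum
      = (PySem.List.pyRange 0 p 1).countP (fun i => pvShare student p i) := by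
    rw [List.map_congr_left (g := fun i => if pvShare student p i then 1 else 0) ?_]
    · rw [PySem.List.sum_map_ite_one_zero_nat]
    · intro i hi
      beta_reduce
      have hib := PySem.List.mem_pyRange_one.mp hi
      rw [tdef]
      have hip : (fun j => pvShare student i j && ((i == p) || (j == p)))
          = (fun j => pvShare student i j && (j == p)) := by
        funext j
        have : (i == p) = false := by simp; omega
        simp [this]
      rw [hip, pv_countP_single _ _ _ (PySem.List.nodup_pyRange_one _ _)]
      have hpm : p ∈ PySem.List.pyRange (i + 1) N 1 := PySem.List.mem_pyRange_one.mpr ⟨by omega, hp⟩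
      by_cases hs : pvShare student i p
      · rw [if_pos ⟨hpm, hs⟩, if_pos]
        rw [pvShare_symm] at hs; exact hs
      · have hs' : pvShare student i p = false := by simpa using hs
        rw [if_neg (by simp [hs']), if_neg]
        rw [pvShare_symm student p i]
        simp [hs']
  -- right piece
  have hright : ((PySem.List.pyRange (p + 1) N 1).map
        (List.countP (fun q => pvShare student q.1 q.2 && (q.1 == p || q.2 == p)) ∘
          (fun i => (PySem.List.pyRange (i + 1) N 1).map (fun j => (i, j))))).sum = 0 := by
    rw [List.map_congr_left (g := fun _ => 0) ?_]
    · simp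
    · intro i hi
      beta_reduce
      have hib := PySem.List.mem_pyRange_one.mp hi
      rw [tdef]
      have hip : (fun j => pvShare student i j && ((i == p) || (j == p)))
          = (fun j => pvShare student i j && (j == p)) := by
        funext j
        have : (i == p) = false := by simp; omega
        simp [this]
      rw [hip, pv_countP_single _ _ _ (PySem.List.nodup_pyRange_one _ _)]
      rw [if_neg]
      rintro ⟨hpm, -⟩
      have := PySem.List.mem_pyRange_one.mp hpm
      omega
  rw [hmid, hleft, hright, List.countP_append, List.countP_cons]
  have : pvShare student p p = true := pvShare_refl student p hrow
  simp [this]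
  omega


lemma pv_counts_eq (student : List (List Int)) (N : Int)
    (hrows : ∀ i : Int, 0 ≤ i → i < N → 1 ≤ (PySem.List.pyGetD student i []).length) :
    ((PySem.List.pyRange 0 N 1).foldl (fun c i =>
      (PySem.List.pyRange (i + 1) N 1).foldl (fun c j =>
        if (PySem.List.pyRange 0 5 1).any (fun grade =>
            match PySem.List.pyGet? (PySem.List.pyGetD student i []) grade,
                  PySem.List.pyGet? (PySem.List.pyGetD student j []) grade with
            | some a, some b => a == b
            | _, _ => false) then
          (c.modify i.toNat (· + 1)).modify j.toNat (· + 1)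
        else c) c) ((PySem.List.pyRange 0 N 1).map (fun _ => (0 : Int))))
      = (PySem.List.pyRange 0 N 1).map (fun i => pvCnt student N i) := by
  set c0 : List Int := (PySem.List.pyRange 0 N 1).map (fun _ => (0 : Int)) with hc0
  set P : List (Int × Int) := (PySem.List.pyRange 0 N 1).flatMap
      (fun i => (PySem.List.pyRange (i + 1) N 1).map (fun j => (i, j))) with hP
  have h1 : ((PySem.List.pyRange 0 N 1).foldl (fun c i =>
      (PySem.List.pyRange (i + 1) N 1).foldl (fun c j =>
        if (PySem.List.pyRange 0 5 1).any (fun grade =>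
            match PySem.List.pyGet? (PySem.List.pyGetD student i []) grade,
                  PySem.List.pyGet? (PySem.List.pyGetD student j []) grade with
            | some a, some b => a == b
            | _, _ => false) then
          (c.modify i.toNat (· + 1)).modify j.toNat (· + 1)
        else c) c) c0)
      = P.foldl (fun c q => if pvShare student q.1 q.2
          then (c.modify q.1.toNat (· + 1)).modify q.2.toNat (· + 1) else c) c0 := by
    rw [hP, List.foldl_flatMap]
    apply PySem.List.foldl_congr_mem
    intro acc i _
    rw [List.foldl_map]
    rfl
  rw [h1]
  have hc0len : c0.length = (PySem.List.pyRange 0 N 1).length := by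
    rw [hc0, List.length_map]
  have hbP : ∀ q ∈ P, 0 ≤ q.1 ∧ q.1 < q.2 ∧ q.2 < (c0.length : Int) := by
    intro q hq
    rw [hP] at hq
    obtain ⟨i, hi, hq'⟩ := List.mem_flatMap.mp hq
    obtain ⟨j, hj, rfl⟩ := List.mem_map.mp hq'
    have h1 := PySem.List.mem_pyRange_one.mp hi
    have h2 := PySem.List.mem_pyRange_one.mp hj
    have h3 : (PySem.List.pyRange 0 N 1).length = (N - 0).toNat :=
      PySem.List.length_pyRange_one 0 N
    constructor
    · exact h1.1
    constructor
    · omega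
    · rw [hc0len, h3]; push_cast; omega
  obtain ⟨hlen, hget⟩ := pv_foldl_inc2 (pvShare student) P c0 hbP
  apply List.ext_getElem
  · rw [hlen, hc0len, List.length_map]
  · intro p hp1 hp2
    have hplen : p < c0.length := by omega
    have hpn : p < (PySem.List.pyRange 0 N 1).length := by omega
    have hgetD := hget p hplen
    rw [List.getD_eq_getElem _ 0 (by omega), List.getD_eq_getElem _ 0 hplen] at hgetD
    rw [hgetD]
    have hrp : (PySem.List.pyRange 0 N 1)[p]'hpn = 0 + (p : Int) :=
      PySem.List.getElem_pyRange_one 0 N p hpn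
    simp only [List.getElem_map]
    rw [hrp]
    have hpN : (p : Int) < N := by
      have h3 : (PySem.List.pyRange 0 N 1).length = (N - 0).toNat :=
        PySem.List.length_pyRange_one 0 N
      omega
    have hpc := pv_pair_count student N (p : Int) (by positivity) hpN (hrows (p : Int) (by positivity) hpN)
    have : ((0 : Int) + (p : Int)) = (p : Int) := by ring
    rw [this]
    rw [pvCnt]
    have hcast : (P.countP (fun q => pvShare student q.1 q.2
        && (q.1 == (p : Int) || q.2 == (p : Int))) : Int)
        = ((PySem.List.pyRange 0 N 1).countP (fun j => pvShare student (p : Int) j) : Int) - 1 := by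
      rw [hP]
      omega
    rw [← hcast]
    simp [hc0]


lemma pv_foldl_argmax (f : Int → Int) :
    ∀ (l : List Int) (bi bv : Int),
      l.foldl (fun (st : Int × Int) i => if f i > st.2 then (i, f i) else st) (bi, bv)
        = if (l.map f).all (fun v => decide (v ≤ bv)) then (bi, bv)
          else (l.getD (List.idxOf ((l.map f).foldl max bv) (l.map f)) 0,
                (l.map f).foldl max bv) := by
  intro l
  induction l with
  | nil => intro bi bv; simp
  | cons x t ih =>
    intro bi bv
    rw [List.foldl_cons, List.map_cons, List.foldl_cons]
    by_cases hx : f x > bv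
    · rw [if_pos hx]
      have hmax : max bv (f x) = f x := by omega
      rw [hmax]
      rw [ih x (f x)]
      by_cases hall : (t.map f).all (fun v => decide (v ≤ f x))
      · rw [if_pos hall]
        have hM : (t.map f).foldl max (f x) = f x := by
          rcases PySem.List.foldl_max_mem (t.map f) (f x) with h | h
          · exact h
          · have h2 := (PySem.List.le_foldl_max (t.map f) (f x)).2 _ h
            have h3 := List.all_eq_true.mp hall _ h
            simp at h3
            have h4 := (PySem.List.le_foldl_max (t.map f) (f x)).1
            omega
        have hcond : ¬ ((f x :: t.map f).all (fun v => decide (v ≤ bv)) = true) := by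
          simp only [List.all_cons, Bool.and_eq_true, decide_eq_true_eq]
          rintro ⟨h, -⟩; omega
        rw [if_neg hcond, hM]
        have : List.idxOf (f x) (f x :: t.map f) = 0 := by
          simp [List.idxOf_cons]
        rw [this]
        simp
      · rw [if_neg hall]
        have hcond : ¬ ((f x :: t.map f).all (fun v => decide (v ≤ bv)) = true) := by
          simp only [List.all_cons, Bool.and_eq_true, decide_eq_true_eq]
          rintro ⟨h, -⟩; omega
        rw [if_neg hcond]
        obtain ⟨v, hv, hvgt⟩ : ∃ v ∈ t.map f, ¬ v ≤ f x := by
          by_contra hc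
          push_neg at hc
          exact hall (List.all_eq_true.mpr (fun v hv => by simpa using hc v hv))
        have hMgt : f x < (t.map f).foldl max (f x) := by
          have := (PySem.List.le_foldl_max (t.map f) (f x)).2 _ hv
          omega
        have hidx : List.idxOf ((t.map f).foldl max (f x)) (f x :: t.map f)
            = List.idxOf ((t.map f).foldl max (f x)) (t.map f) + 1 := by
          rw [List.idxOf_cons]
          have : (f x == (t.map f).foldl max (f x)) = false := by
            simp; omega
          simp [this]
        rw [hidx]
        simp
    · rw [if_neg hx]
      have hmax : max bv (f x) = bv := by omega
      rw [hmax, ih bi bv]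
      by_cases hall : (t.map f).all (fun v => decide (v ≤ bv))
      · rw [if_pos hall, if_pos]
        simp only [List.all_cons, Bool.and_eq_true, decide_eq_true_eq]
        exact ⟨by omega, hall⟩
      · rw [if_neg hall, if_neg]
        swap
        · simp only [List.all_cons, Bool.and_eq_true, decide_eq_true_eq]
          rintro ⟨-, h⟩
          exact hall h
        obtain ⟨v, hv, hvgt⟩ : ∃ v ∈ t.map f, ¬ v ≤ bv := by
          by_contra hc
          push_neg at hc
          exact hall (List.all_eq_true.mpr (fun v hv => by simpa using hc v hv))
        have hMgt : bv < (t.map f).foldl max bv := by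
          have := (PySem.List.le_foldl_max (t.map f) bv).2 _ hv
          omega
        have hidx : List.idxOf ((t.map f).foldl max bv) (f x :: t.map f)
            = List.idxOf ((t.map f).foldl max bv) (t.map f) + 1 := by
          rw [List.idxOf_cons]
          have : (f x == (t.map f).foldl max bv) = false := by
            simp; omega
          simp [this]
        rw [hidx]
        simp

lemma pv_enum_eq (r : List Int) :
    PySem.List.enumerate (PySem.List.slice r none (some 5)) 0
      = (PySem.List.pyRange 0 (PySem.List.len (r.take 5)) 1).map
          (fun g => (g, PySem.List.pyGetD r g 0)) := by
  have h1 : PySem.List.slice r none (some 5) = r.take 5 := by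
    have := PySem.List.slice_to_natCast (xs := r) (b := 5)
    simpa using this
  rw [h1, PySem.List.enumerate_eq_map_pyRange _ 0]
  apply List.map_congr_left
  intro g hg
  have hb := PySem.List.mem_pyRange_one.mp hg
  have hgr : g < ((r.take 5).length : Int) := by
    rw [PySem.List.len_eq] at hb
    exact hb.2
  have hlt : (r.take 5).length ≤ r.length := by
    rw [List.length_take]; omega
  rw [PySem.List.pyGetD_eq_getElem _ _ hb.1 hgr,
    PySem.List.pyGetD_eq_getElem _ _ hb.1 (by omega)]
  congr 1
  exact List.getElem_take

lemma pv_mates_lenW' (student : List (List Int)) (N i : Int) :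
    PySem.Set.len ((PySem.List.pyRange 0
        (PySem.List.len ((PySem.List.pyGetD student i []).take 5)) 1).foldl (fun m g =>
        PySem.Set.union m
          ((PySem.List.pyRange 0 N 1).filter
            (fun j => (decide (0 ≤ g)
                && decide (g < PySem.List.len ((PySem.List.pyGetD student j []).take 5)))
              && (PySem.List.pyGetD (PySem.List.pyGetD student i []) g 0 == pvVal student j g))))
        PySem.Set.empty) - 1
      = pvCnt student N i :=
  pv_mates_lenW student N i

lemma pv_A_eq (student : List (List Int)) (N : Int)
    (hrows : ∀ i : Int, 0 ≤ i → i < N → 1 ≤ (PySem.List.pyGetD student i []).length) :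
    solution N student
      = (match PySem.List.max? ((PySem.List.pyRange 0 N 1).map (fun i => pvCnt student N i))
            (fun y => y) with
        | some m => (((PySem.List.index? ((PySem.List.pyRange 0 N 1).map
            (fun i => pvCnt student N i)) m).getD 0 : Nat) : Int) + 1
        | none => 0) := by
  unfold solution
  dsimp only
  rw [pv_counts_eq student N hrows]

lemma pv_B_eq (student : List (List Int)) (N : Int) :
    solution_alt N student
      = ((PySem.List.pyRange 0 N 1).foldl (fun (st : Int × Int) i =>
          if pvCnt student N i > st.2 then (i, pvCnt student N i) else st) (0, -1)).1 + 1 := by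
  unfold solution_alt
  dsimp only
  have hgroups : ((PySem.List.pyRange 0 N 1).foldl (fun d i =>
        (PySem.List.enumerate (PySem.List.slice (PySem.List.pyGetD student i []) none (some 5)) 0).foldl
          (fun d gv => d.modify (gv.1, gv.2) [] (fun s => PySem.Set.add s i)) d) PySem.Dict.empty)
      = ((PySem.List.pyRange 0 N 1).foldl (fun d i =>
        (PySem.List.pyRange 0 (PySem.List.len ((PySem.List.pyGetD student i []).take 5)) 1).foldl
          (fun d g => d.modify (g, pvVal student i g) [] (fun s => PySem.Set.add s i)) d)
        PySem.Dict.empty) := by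
    apply PySem.List.foldl_congr_mem
    intro d i _
    rw [pv_enum_eq, List.foldl_map]
    rfl
  rw [hgroups]
  congr 1
  congr 1
  apply PySem.List.foldl_congr_mem
  intro acc i _
  rw [pv_enum_eq, List.foldl_map]
  dsimp only
  simp only [pv_build_getDW]
  rw [pv_mates_lenW' student N i]

lemma pv_A_one (student : List (List Int)) : solution 1 student = 1 := rfl

lemma pv_B_one (student : List (List Int)) : solution_alt 1 student = 1 := by
  unfold solution_alt
  dsimp only
  rw [show PySem.List.pyRange 0 1 1 = [0] from rfl, List.foldl_cons, List.foldl_nil]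
  split <;> rfl

theorem pv_final (N : Int) (student : List (List Int)) (hN : 1 ≤ N)
    (hrows : ∀ i : Int, 0 ≤ i → i < N → 1 ≤ (PySem.List.pyGetD student i []).length) :
    solution N student = solution_alt N student := by
  rw [pv_A_eq student N hrows, pv_B_eq, pv_foldl_argmax (pvCnt student N) (PySem.List.pyRange 0 N 1) 0 (-1)]
  set l := PySem.List.pyRange 0 N 1 with hldef
  set counts := l.map (fun i => pvCnt student N i) with hcounts
  have hl : l = 0 :: PySem.List.pyRange 1 N 1 := by
    rw [hldef]; exact PySem.List.pyRange_one_cons (by omega)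
  have hc00 : 0 ≤ pvCnt student N 0 := by
    have h0l : (0 : Int) ∈ l := by
      rw [hldef]; exact PySem.List.mem_pyRange_one.mpr ⟨le_refl 0, by omega⟩
    have hpos : 0 < l.countP (fun j => pvShare student 0 j) :=
      List.countP_pos_iff.mpr ⟨0, h0l, pvShare_refl student 0 (hrows 0 le_rfl (by omega))⟩
    unfold pvCnt
    rw [← hldef]
    omega
  have hcounts_cons : counts
      = pvCnt student N 0 :: (PySem.List.pyRange 1 N 1).map (fun i => pvCnt student N i) := by
    rw [hcounts, hl, List.map_cons]
  have hc0mem : pvCnt student N 0 ∈ counts := by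
    rw [hcounts_cons]; exact List.mem_cons_self
  have hall : ¬ (counts.all (fun v => decide (v ≤ -1)) = true) := by
    intro h
    have := List.all_eq_true.mp h _ hc0mem
    simp at this
    omega
  rw [if_neg hall]
  set M := counts.foldl max (-1) with hM
  have hc0M : pvCnt student N 0 ≤ M := (PySem.List.le_foldl_max counts (-1)).2 _ hc0mem
  have hMmem : M ∈ counts := by
    rcases PySem.List.foldl_max_mem counts (-1) with h | h
    · exfalso; rw [hM] at *; omega
    · exact h
  have hmax : PySem.List.max? counts (fun y => y) = some M := by
    rw [hcounts_cons, PySem.List.max?_id_cons]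
    congr 1
    rw [hM, hcounts_cons, List.foldl_cons, max_eq_right (by omega : (-1 : Int) ≤ pvCnt student N 0)]
  rw [hmax]
  dsimp only
  obtain ⟨k, hk⟩ : ∃ k, List.idxOf? M counts = some k :=
    Option.isSome_iff_exists.mp (List.isSome_idxOf?.mpr hMmem)
  have hidx : List.idxOf M counts = k := by
    rw [List.idxOf_eq_getD_idxOf?, hk]; rfl
  rw [PySem.List.index?_eq_idxOf?, hk]
  have hklen : k < counts.length := by
    rw [← hidx]; exact List.idxOf_lt_length_of_mem hMmem
  have hllen : counts.length = l.length := by rw [hcounts]; exact List.length_map _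
  have hkl : k < (PySem.List.pyRange 0 N 1).length := by
    have h2 := hllen
    rw [hldef] at h2
    omega
  have hgd : l.getD (List.idxOf M counts) 0 = 0 + (k : Int) := by
    rw [hidx, hldef, List.getD_eq_getElem _ _ hkl]
    exact PySem.List.getElem_pyRange_one 0 N k hkl
  rw [hgd]
  simp

-- ===== VERDICT (by name: the statement is the Claim_ definition above) =====
theorem solution_spec : Claim_equal_solution := by
  intro N student _ hpre
  obtain ⟨hN, hlen, hdisj⟩ := hpre
  unfold Spec_solution
  rw [PySem.List.len_eq] at hlen
  rcases hdisj with h1 | hrows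
  · subst h1
    rw [pv_A_one, pv_B_one]
  · refine pv_final N student hN ?_
    intro i h0 hiN
    have hiL : (i : Int) < (student.length : Int) := by omega
    rw [PySem.List.pyGetD_eq_getElem _ _ h0 (by omega)]
    have hit : i.toNat < (student.take N.toNat).length := by
      simp [List.length_take]; omega
    have he : (student.take N.toNat)[i.toNat]'hit = student[i.toNat]'(by omega) :=
      List.getElem_take
    rw [← he]
    exact hrows _ (List.getElem_mem hit)
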